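-- pv_equiv track=rewrite | github.com/the-full-stack/website | docs/blog/posts/megatron-lm-parallelism/pipeline.py | generate
-- ===== SOURCE A (Python) =====
-- from typing import Iterable, List, Tuple, Annotated, Optional, Generator, Dict, Callable, Any
--
-- def generate(
--
--     n_microbatches: int,
--     n_partitions: int,
-- ) -> Iterable[List[Tuple[Annotated[int, "batch_idx"], Annotated[int, "partition_idx"]]]]:
--     assert (
--         n_microbatches > 0
--     ), "The number of microbatches must be \
--         greater than 0"
--     assert (
--         n_partitions > 0
--     ), "The number of partitions must be \
--         greater than 0"
--
--     n_partitions = n_partitions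
--     n_microbatches = n_microbatches
--     n_clock_cycles = n_partitions + n_microbatches - 1
--
--     for clock_idx in range(n_clock_cycles):
--         start_partrition = max(clock_idx + 1 - n_microbatches, 0)
--         end_partition = min(clock_idx + 1, n_partitions)
--
--         tasks = []
--         for partition_idx in range(start_partrition, end_partition):
--             microbatch_idx = clock_idx - partition_idx
--             tasks.append((microbatch_idx, partition_idx))
--
--         yield tasks
-- ===== SOURCE B (Python) =====
-- def generate(
--     n_microbatches: int,
--     n_partitions: int,
-- ):
--     assert (
--         n_microbatches > 0
--     ), "The number of microbatches must be \
--         greater than 0"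
--     assert (
--         n_partitions > 0
--     ), "The number of partitions must be \
--         greater than 0"
--
--     n_clock_cycles = n_partitions + n_microbatches - 1
--     buckets = [[] for _ in range(n_clock_cycles)]
--     for partition_idx in range(n_partitions):
--         for microbatch_idx in range(n_microbatches):
--             buckets[microbatch_idx + partition_idx].append((microbatch_idx, partition_idx))
--     yield from buckets
-- ===== Notes on version B (the rewrite author's own statement) =====
-- stated objective: alternative
-- what changed: Instead of computing, for each clock cycle, the partition interval with max/min and scanning it, B pre-allocates one empty bucket per clock cycle and fills them with a plain partition-by-microbatch double loop, appending (microbatch, partition) to bucket[microbatch+partition]; no per-clock interval arithmetic remains.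
import Mathlib
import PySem

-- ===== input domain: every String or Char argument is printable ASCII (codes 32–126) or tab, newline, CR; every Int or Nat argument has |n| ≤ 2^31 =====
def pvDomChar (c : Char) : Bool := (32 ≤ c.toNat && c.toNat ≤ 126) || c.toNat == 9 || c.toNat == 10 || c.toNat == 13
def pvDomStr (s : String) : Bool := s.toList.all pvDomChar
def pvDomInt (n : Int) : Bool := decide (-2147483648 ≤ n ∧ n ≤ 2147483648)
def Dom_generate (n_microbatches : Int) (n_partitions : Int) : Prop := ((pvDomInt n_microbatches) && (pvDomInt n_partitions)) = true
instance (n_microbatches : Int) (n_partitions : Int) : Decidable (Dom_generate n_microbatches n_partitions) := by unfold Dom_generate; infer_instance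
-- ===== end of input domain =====

-- B replaces A's per-clock interval computation (max/min bounds per cycle) by bucket-filling:
-- one empty bucket per clock cycle, filled by a plain partition×microbatch double loop (alternative decomposition, same cost).


-- ===== PORT A =====
-- literal port of A; the failing asserts (count ≤ 0) are excluded by Pre_generate, the port returns [] there
def generate (n_microbatches : Int) (n_partitions : Int) : List (List (Int × Int)) :=
  if n_microbatches > 0 ∧ n_partitions > 0 then
    let n_clock_cycles := n_partitions + n_microbatches - 1
    (PySem.List.pyRange 0 n_clock_cycles 1).foldl (fun acc clock_idx =>
      let start_partrition := max (clock_idx + 1 - n_microbatches) 0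
      let end_partition := min (clock_idx + 1) n_partitions
      let tasks := (PySem.List.pyRange start_partrition end_partition 1).foldl
        (fun ts partition_idx => ts ++ [(clock_idx - partition_idx, partition_idx)]) []
      acc ++ [tasks]) []
  else []

-- ===== PORT B =====
-- literal port of Source B; buckets[i].append(v) is the read-modify-write pyGetD/pySetD (the index is always in range)
def generate_alt (n_microbatches : Int) (n_partitions : Int) : List (List (Int × Int)) :=
  if n_microbatches > 0 ∧ n_partitions > 0 then
    let n_clock_cycles := n_partitions + n_microbatches - 1
    let buckets := (PySem.List.pyRange 0 n_clock_cycles 1).map (fun _ => ([] : List (Int × Int)))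
    (PySem.List.pyRange 0 n_partitions 1).foldl (fun bs partition_idx =>
      (PySem.List.pyRange 0 n_microbatches 1).foldl (fun bs microbatch_idx =>
        PySem.List.pySetD bs (microbatch_idx + partition_idx)
          (PySem.List.pyGetD bs (microbatch_idx + partition_idx) [] ++ [(microbatch_idx, partition_idx)])) bs) buckets
  else []

-- ===== PRECONDITION & SPEC =====
-- Pre_: both asserts must pass, i.e. both counts positive; A (and B) raise AssertionError otherwise
def Pre_generate (n_microbatches : Int) (n_partitions : Int) : Prop :=
  0 < n_microbatches ∧ 0 < n_partitions
instance (n_microbatches : Int) (n_partitions : Int) : Decidable (Pre_generate n_microbatches n_partitions) := by unfold Pre_generate; infer_instance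
def pvWitness_generate : Int × Int := (3, 2)

def Spec_generate (n_microbatches : Int) (n_partitions : Int) (out : List (List (Int × Int))) : Prop := out = generate_alt n_microbatches n_partitions
instance (n_microbatches : Int) (n_partitions : Int) (out : List (List (Int × Int))) : Decidable (Spec_generate n_microbatches n_partitions out) := by unfold Spec_generate; infer_instance

-- ===== CLAIM (what is proved, stated in full; the proofs are below) =====
def Claim_equal_generate : Prop := ∀ (n_microbatches : Int) (n_partitions : Int), Dom_generate n_microbatches n_partitions → Pre_generate n_microbatches n_partitions → Spec_generate n_microbatches n_partitions (generate n_microbatches n_partitions)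

-- ===== LEMMAS AND PROOFS =====

-- bucket append: B's buckets[j].append(v) at Nat index
def pvApp (bs : List (List (Int × Int))) (j : Nat) (v : Int × Int) : List (List (Int × Int)) :=
  bs.set j (bs.getD j [] ++ [v])

-- B's inner loop (one partition row k) and full double loop, at Nat level
def pvRow (M k : Nat) (bs : List (List (Int × Int))) : List (List (Int × Int)) :=
  (List.range M).foldl (fun bs mb => pvApp bs (mb + k) ((mb : Int), (k : Int))) bs

def pvFill (M P : Nat) (bs : List (List (Int × Int))) : List (List (Int × Int)) :=
  (List.range P).foldl (fun bs k => pvRow M k bs) bs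

-- contents of bucket c after the first P partition rows
def pvSeg (M c : Nat) : Nat → List (Int × Int)
  | 0 => []
  | P + 1 => pvSeg M c P ++ (if P ≤ c ∧ c < P + M then [(((c - P : Nat) : Int), (P : Int))] else [])

lemma pvApp_length (bs : List (List (Int × Int))) (j : Nat) (v : Int × Int) :
    (pvApp bs j v).length = bs.length := by simp [pvApp]

lemma pvApp_getD_self (bs : List (List (Int × Int))) (j : Nat) (v : Int × Int)
    (h : j < bs.length) : (pvApp bs j v).getD j [] = bs.getD j [] ++ [v] := by
  simp [pvApp, List.getD_eq_getElem?_getD, List.getElem?_set_self h]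

lemma pvApp_getD_ne (bs : List (List (Int × Int))) (j : Nat) (v : Int × Int) (c : Nat)
    (h : c ≠ j) : (pvApp bs j v).getD c [] = bs.getD c [] := by
  simp [pvApp, List.getD_eq_getElem?_getD, List.getElem?_set_ne (Ne.symm h)]

lemma pvRow_length (M k : Nat) (bs : List (List (Int × Int))) :
    (pvRow M k bs).length = bs.length := by
  induction M with
  | zero => simp [pvRow]
  | succ M ih =>
    rw [pvRow, List.range_succ, List.foldl_append]
    simp only [List.foldl_cons, List.foldl_nil]
    rw [pvApp_length]
    exact ih

lemma pvRow_getD (M k : Nat) (bs : List (List (Int × Int))) (c : Nat) (hc : c < bs.length) :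
    (pvRow M k bs).getD c []
      = bs.getD c [] ++ (if k ≤ c ∧ c < k + M then [(((c - k : Nat) : Int), (k : Int))] else []) := by
  induction M with
  | zero =>
    have h : ¬ (k ≤ c ∧ c < k + 0) := by omega
    simp [pvRow]
  | succ M ih =>
    rw [pvRow, List.range_succ, List.foldl_append]
    simp only [List.foldl_cons, List.foldl_nil]
    have hlen : (pvRow M k bs).length = bs.length := pvRow_length M k bs
    by_cases hck : c = M + k
    · subst hck
      have h1 : ¬ (k ≤ M + k ∧ M + k < k + M) := by omega
      have h2 : k ≤ M + k ∧ M + k < k + (M + 1) := by omega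
      rw [show (List.range M).foldl (fun bs mb => pvApp bs (mb + k) ((mb : Int), (k : Int))) bs = pvRow M k bs from rfl]
      rw [pvApp_getD_self _ _ _ (by omega), ih, if_neg h1, if_pos h2]
      simp
    · rw [show (List.range M).foldl (fun bs mb => pvApp bs (mb + k) ((mb : Int), (k : Int))) bs = pvRow M k bs from rfl]
      rw [pvApp_getD_ne _ _ _ _ hck, ih]
      have h3 : (k ≤ c ∧ c < k + (M + 1)) ↔ (k ≤ c ∧ c < k + M) := by omega
      simp [h3]

lemma pvFill_length (M P : Nat) (bs : List (List (Int × Int))) :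
    (pvFill M P bs).length = bs.length := by
  induction P with
  | zero => simp [pvFill]
  | succ P ih =>
    rw [pvFill, List.range_succ, List.foldl_append]
    simp only [List.foldl_cons, List.foldl_nil]
    rw [show (List.range P).foldl (fun bs k => pvRow M k bs) bs = pvFill M P bs from rfl]
    rw [pvRow_length]
    exact ih

lemma pvFill_getD (M P : Nat) (bs : List (List (Int × Int))) (c : Nat) (hc : c < bs.length) :
    (pvFill M P bs).getD c [] = bs.getD c [] ++ pvSeg M c P := by
  induction P with
  | zero => simp [pvFill, pvSeg]
  | succ P ih =>
    rw [pvFill, List.range_succ, List.foldl_append]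
    simp only [List.foldl_cons, List.foldl_nil]
    rw [show (List.range P).foldl (fun bs k => pvRow M k bs) bs = pvFill M P bs from rfl]
    rw [pvRow_getD _ _ _ _ (by rw [pvFill_length]; exact hc), ih, pvSeg, List.append_assoc]

-- pvSeg in closed interval form
lemma pvSeg_eq (M c P : Nat) :
    pvSeg M c P = (List.range (min (c + 1) P - (c + 1 - M))).map
      (fun j => (((c - ((c + 1 - M) + j) : Nat) : Int), (((c + 1 - M) + j : Nat) : Int))) := by
  induction P with
  | zero => simp [pvSeg]
  | succ P ih =>
    rw [pvSeg, ih]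
    by_cases h : P ≤ c ∧ c < P + M
    · have hmin1 : min (c + 1) (P + 1) - (c + 1 - M) = (min (c + 1) P - (c + 1 - M)) + 1 := by omega
      have hPa : (c + 1 - M) + (min (c + 1) P - (c + 1 - M)) = P := by omega
      rw [if_pos h, hmin1, List.range_succ, List.map_append]
      simp only [List.map_cons, List.map_nil]
      rw [hPa]
    · rw [if_neg h]
      have h4 : min (c + 1) (P + 1) - (c + 1 - M) = min (c + 1) P - (c + 1 - M) := by omega
      rw [h4, List.append_nil]

-- ===== VERDICT (by name: the statement is the Claim_ definition above) =====
set_option maxHeartbeats 1000000 in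
theorem generate_spec : Claim_equal_generate := by
  intro m p _hdom hpre
  obtain ⟨hm, hp⟩ := hpre
  unfold Spec_generate generate generate_alt
  rw [if_pos ⟨hm, hp⟩, if_pos ⟨hm, hp⟩]
  simp only [PySem.List.foldl_append_singleton_eq_map, List.nil_append,
    PySem.List.pyRange_one, List.foldl_map, List.map_map, zero_add, Int.sub_zero,
    Function.comp_def, List.map_const', List.length_range]
  have hbody : ∀ (bs : List (List (Int × Int))) (k mb : Nat),
      PySem.List.pySetD bs ((mb : Int) + (k : Int))
        (PySem.List.pyGetD bs ((mb : Int) + (k : Int)) [] ++ [((mb : Int), (k : Int))])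
        = pvApp bs (mb + k) ((mb : Int), (k : Int)) := by
    intro bs k mb
    have hcast : ((mb : Int) + (k : Int)) = (((mb + k : Nat)) : Int) := by push_cast; ring
    rw [hcast, PySem.List.pySetD_natCast, PySem.List.pyGetD_natCast]
    rfl
  simp only [hbody]
  rw [show (List.range p.toNat).foldl
      (fun bs k => (List.range m.toNat).foldl (fun bs mb => pvApp bs (mb + k) ((mb : Int), (k : Int))) bs)
      (List.replicate (p + m - 1).toNat []) = pvFill m.toNat p.toNat (List.replicate (p + m - 1).toNat []) from rfl]
  have hm' : m = (m.toNat : Int) := (Int.toNat_of_nonneg (le_of_lt hm)).symm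
  have hp' : p = (p.toNat : Int) := (Int.toNat_of_nonneg (le_of_lt hp)).symm
  apply List.ext_getElem
  · simp [pvFill_length]
  · intro i h1 h2
    simp only [List.length_map, List.length_range] at h1
    have h2' := h2
    rw [pvFill_length] at h2
    simp only [List.getElem_map, List.getElem_range]
    rw [← List.getD_eq_getElem _ ([] : List (Int × Int)) h2']
    rw [pvFill_getD _ _ _ _ h2]
    have hrep : (List.replicate (p + m - 1).toNat ([] : List (Int × Int))).getD i [] = [] := by
      simp [List.getD_eq_getElem?_getD, List.getElem?_replicate]
      split <;> rfl
    rw [hrep, List.nil_append, pvSeg_eq]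
    have hNrep : i < (p + m - 1).toNat := by simpa using h2
    have hE : (min ((i : Int) + 1) p - max ((i : Int) + 1 - m) 0).toNat
        = min (i + 1) p.toNat - (i + 1 - m.toNat) := by omega
    rw [hE]
    apply List.map_congr_left
    intro j hj
    rw [List.mem_range] at hj
    simp only [Prod.mk.injEq]
    constructor <;> omega
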